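-- pv_equiv track=rewrite | github.com/pawseidon/Discord-AI-Chatbot | bot_utilities/reasoning_utils.py | _is_creative_request
-- ===== SOURCE A (Python) =====
-- def _is_creative_request(query: str) -> bool:
--     """Check if the query is asking for creative content"""
--     creative_phrases = [
--         'write a', 'create a', 'generate a', 'compose a', 'make up a',
--         'story about', 'poem about', 'song lyrics', 'creative idea',
--         'imagine a', 'invent a', 'fiction about', 'write me a',
--         'be creative', 'use your imagination', 'fantasy about',
--         'creative story', 'creative description', 'fictional scenario'
--     ]
--
--     return any(phrase in query.lower() for phrase in creative_phrases)
-- ===== SOURCE B (Python) =====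
-- # Index the creative phrases by first character: at each position of the
-- # lowered query, only the (few) phrases starting with that character are tested.
-- _SUFFIXES_BY_FIRST = {
--     'w': ('rite a', 'rite me a'),
--     'c': ('reate a', 'ompose a', 'reative idea', 'reative story',
--           'reative description'),
--     'g': ('enerate a',),
--     'm': ('ake up a',),
--     's': ('tory about', 'ong lyrics'),
--     'p': ('oem about',),
--     'i': ('magine a', 'nvent a'),
--     'f': ('iction about', 'antasy about', 'ictional scenario'),
--     'b': ('e creative',),
--     'u': ('se your imagination',),
-- }
--
--
-- def _is_creative_request(query: str) -> bool:
--     q = query.lower()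
--     for i, ch in enumerate(q):
--         for suf in _SUFFIXES_BY_FIRST.get(ch, ()):
--             if q.startswith(suf, i + 1):
--                 return True
--     return False
-- ===== Notes on version B (the rewrite author's own statement) =====
-- stated objective: alternative
-- what changed: A loops phrase-by-phrase doing one substring-containment test per phrase; B indexes the phrases by first character in a dict of suffix tuples and scans the lowered query position by position, testing only the suffixes registered under the current character.
import Mathlib
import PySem

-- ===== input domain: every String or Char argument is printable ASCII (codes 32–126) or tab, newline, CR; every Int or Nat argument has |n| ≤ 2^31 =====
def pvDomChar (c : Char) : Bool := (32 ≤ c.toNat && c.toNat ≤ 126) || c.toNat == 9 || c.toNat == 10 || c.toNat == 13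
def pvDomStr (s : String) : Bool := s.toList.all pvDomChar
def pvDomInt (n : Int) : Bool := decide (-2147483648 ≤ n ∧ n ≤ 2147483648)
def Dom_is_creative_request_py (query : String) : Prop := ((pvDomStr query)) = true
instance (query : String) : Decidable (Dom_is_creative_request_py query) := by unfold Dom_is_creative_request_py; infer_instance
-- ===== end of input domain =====

-- B replaces A's phrase-major substring loop by a position scan over the lowered query
-- that indexes the phrases by their first character (dict of suffix lists) — alternative.


-- ===== PORT A =====
def creativePhrases : List String :=
  ["write a", "create a", "generate a", "compose a", "make up a",
   "story about", "poem about", "song lyrics", "creative idea",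
   "imagine a", "invent a", "fiction about", "write me a",
   "be creative", "use your imagination", "fantasy about",
   "creative story", "creative description", "fictional scenario"]

def is_creative_request_py (query : String) : Bool :=
  let ql := PySem.Str.lower query
  creativePhrases.any (fun phrase => PySem.Str.isIn phrase ql)

-- ===== PORT B =====
-- B's module constant `_SUFFIXES_BY_FIRST`: the phrases indexed by first character
def sufByFirst : PySem.Dict Char (List String) := PySem.Dict.ofList
  [('w', ["rite a", "rite me a"]),
   ('c', ["reate a", "ompose a", "reative idea", "reative story",
          "reative description"]),
   ('g', ["enerate a"]),
   ('m', ["ake up a"]),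
   ('s', ["tory about", "ong lyrics"]),
   ('p', ["oem about"]),
   ('i', ["magine a", "nvent a"]),
   ('f', ["iction about", "antasy about", "ictional scenario"]),
   ('b', ["e creative"]),
   ('u', ["se your imagination"])]

-- B's `for i, ch in enumerate(q): …` early-return loop as structural recursion on the
-- character list; `q.startswith(suf, i + 1)` is exactly a prefix test on the tail.
def altScan : List Char → Bool
  | [] => false
  | ch :: rest =>
      ((PySem.Dict.getD sufByFirst ch []).any
        (fun suf => PySem.Chars.startswith rest (String.toList suf))) || altScan rest

def is_creative_request_py_alt (query : String) : Bool :=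
  altScan (PySem.Str.lower query).toList

-- ===== PRECONDITION & SPEC =====
def Spec_is_creative_request_py (query : String) (out : Bool) : Prop := out = is_creative_request_py_alt query
instance (query : String) (out : Bool) : Decidable (Spec_is_creative_request_py query out) := by unfold Spec_is_creative_request_py; infer_instance

-- ===== CLAIM (what is proved, stated in full; the proofs are below) =====
def Claim_equal_is_creative_request_py : Prop := ∀ (query : String), Dom_is_creative_request_py query → Spec_is_creative_request_py query (is_creative_request_py query)

-- ===== LEMMAS AND PROOFS =====

-- one position of B's scan = "some phrase starts here" on A's phrase list
theorem step_eq (ch : Char) (rest : List Char) :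
    ((PySem.Dict.getD sufByFirst ch []).any
      (fun suf => PySem.Chars.startswith rest (String.toList suf))) =
    creativePhrases.any (fun p => PySem.Chars.startswith (ch :: rest) p.toList) := by
  by_cases hw : ch = 'w'
  · subst hw
    rw [show PySem.Dict.getD sufByFirst 'w' [] = ["rite a", "rite me a"] from rfl]
    simp [creativePhrases, PySem.Chars.startswith, List.isPrefixOf]
  by_cases hc : ch = 'c'
  · subst hc
    rw [show PySem.Dict.getD sufByFirst 'c' [] = ["reate a", "ompose a", "reative idea", "reative story", "reative description"] from rfl]
    simp [creativePhrases, PySem.Chars.startswith, List.isPrefixOf]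
  by_cases hg : ch = 'g'
  · subst hg
    rw [show PySem.Dict.getD sufByFirst 'g' [] = ["enerate a"] from rfl]
    simp [creativePhrases, PySem.Chars.startswith, List.isPrefixOf]
  by_cases hm : ch = 'm'
  · subst hm
    rw [show PySem.Dict.getD sufByFirst 'm' [] = ["ake up a"] from rfl]
    simp [creativePhrases, PySem.Chars.startswith, List.isPrefixOf]
  by_cases hs : ch = 's'
  · subst hs
    rw [show PySem.Dict.getD sufByFirst 's' [] = ["tory about", "ong lyrics"] from rfl]
    simp [creativePhrases, PySem.Chars.startswith, List.isPrefixOf]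
  by_cases hp : ch = 'p'
  · subst hp
    rw [show PySem.Dict.getD sufByFirst 'p' [] = ["oem about"] from rfl]
    simp [creativePhrases, PySem.Chars.startswith, List.isPrefixOf]
  by_cases hi : ch = 'i'
  · subst hi
    rw [show PySem.Dict.getD sufByFirst 'i' [] = ["magine a", "nvent a"] from rfl]
    simp [creativePhrases, PySem.Chars.startswith, List.isPrefixOf]
  by_cases hf : ch = 'f'
  · subst hf
    rw [show PySem.Dict.getD sufByFirst 'f' [] = ["iction about", "antasy about", "ictional scenario"] from rfl]
    simp [creativePhrases, PySem.Chars.startswith, List.isPrefixOf]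
  by_cases hb : ch = 'b'
  · subst hb
    rw [show PySem.Dict.getD sufByFirst 'b' [] = ["e creative"] from rfl]
    simp [creativePhrases, PySem.Chars.startswith, List.isPrefixOf]
  by_cases hu : ch = 'u'
  · subst hu
    rw [show PySem.Dict.getD sufByFirst 'u' [] = ["se your imagination"] from rfl]
    simp [creativePhrases, PySem.Chars.startswith, List.isPrefixOf]
  have hc0 : sufByFirst.contains ch = false := by
    unfold PySem.Dict.contains
    rw [show sufByFirst.items = [('w', ["rite a", "rite me a"]), ('c', ["reate a", "ompose a", "reative idea", "reative story", "reative description"]), ('g', ["enerate a"]), ('m', ["ake up a"]), ('s', ["tory about", "ong lyrics"]), ('p', ["oem about"]), ('i', ["magine a", "nvent a"]), ('f', ["iction about", "antasy about", "ictional scenario"]), ('b', ["e creative"]), ('u', ["se your imagination"])] from rfl]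
    simp [Ne.symm hw, Ne.symm hc, Ne.symm hg, Ne.symm hm, Ne.symm hs, Ne.symm hp, Ne.symm hi, Ne.symm hf, Ne.symm hb, Ne.symm hu]
  rw [PySem.Dict.getD_of_not_contains _ _ hc0]
  simp [creativePhrases, PySem.Chars.startswith, List.isPrefixOf, Ne.symm hw, Ne.symm hc, Ne.symm hg, Ne.symm hm, Ne.symm hs, Ne.symm hp, Ne.symm hi, Ne.symm hf, Ne.symm hb, Ne.symm hu]

-- 'phrase in q' splits at the head position
theorem isIn_cons (p : List Char) (ch : Char) (rest : List Char) :
    PySem.Chars.isIn p (ch :: rest) =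
      (PySem.Chars.startswith (ch :: rest) p || PySem.Chars.isIn p rest) := by
  rw [Bool.eq_iff_iff]
  simp only [Bool.or_eq_true, PySem.Chars.isIn_iff_infix, PySem.Chars.startswith_iff]
  exact List.infix_cons_iff

-- B's scan computes A's any-phrase-contained test
theorem altScan_eq (q : List Char) :
    altScan q = creativePhrases.any (fun p => PySem.Chars.isIn p.toList q) := by
  induction q with
  | nil => decide
  | cons ch rest ih =>
      show (_ || altScan rest) = _
      rw [step_eq, ih, Bool.eq_iff_iff]
      simp only [List.any_eq_true, Bool.or_eq_true, isIn_cons]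
      constructor
      · rintro (⟨p, hp, h⟩ | ⟨p, hp, h⟩)
        · exact ⟨p, hp, Or.inl h⟩
        · exact ⟨p, hp, Or.inr h⟩
      · rintro ⟨p, hp, h | h⟩
        · exact Or.inl ⟨p, hp, h⟩
        · exact Or.inr ⟨p, hp, h⟩

-- ===== VERDICT (by name: the statement is the Claim_ definition above) =====
theorem is_creative_request_py_spec : Claim_equal_is_creative_request_py := by
  intro query _
  unfold Spec_is_creative_request_py is_creative_request_py is_creative_request_py_alt
  rw [altScan_eq]
  simp only [PySem.Str.isIn_eq, PySem.Str.toList_lower]
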